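-- pv_equiv track=rewrite | github.com/vladokovac/aoc-2018 | 2/day2.py | calculate_string_distance
-- ===== SOURCE A (Python) =====
-- def calculate_string_distance(first_string, second_string):
--     if len(first_string) == 0:
--         return len(second_string)
--     if len(second_string) == 0:
--         return len(first_string)
--
--     if first_string[0] == second_string[0]:
--         distance = 0
--     else:
--         distance = 1
--
--     return distance + calculate_string_distance(first_string[1:], second_string[1:])
-- ===== SOURCE B (Python) =====
-- def calculate_string_distance(first_string, second_string):
--     return sum(x != y for x, y in zip(first_string, second_string)) + abs(len(first_string) - len(second_string))
-- ===== Notes on version B (the rewrite author's own statement) =====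
-- stated objective: faster
-- what changed: Replaces the O(n^2) recursion with string slicing by a single linear pass over zipped characters plus the absolute length difference.
import Mathlib
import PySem

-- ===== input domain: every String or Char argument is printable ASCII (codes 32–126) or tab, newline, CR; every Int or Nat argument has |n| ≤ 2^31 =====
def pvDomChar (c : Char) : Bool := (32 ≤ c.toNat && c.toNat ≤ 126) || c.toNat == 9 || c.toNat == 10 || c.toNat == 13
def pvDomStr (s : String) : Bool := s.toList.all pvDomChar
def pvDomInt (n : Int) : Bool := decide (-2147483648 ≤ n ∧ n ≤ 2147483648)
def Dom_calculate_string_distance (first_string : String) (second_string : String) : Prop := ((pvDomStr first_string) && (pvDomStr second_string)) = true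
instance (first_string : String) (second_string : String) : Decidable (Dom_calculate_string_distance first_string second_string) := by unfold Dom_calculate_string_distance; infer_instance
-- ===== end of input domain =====

-- B replaces A's O(n^2) slicing recursion by one linear pass over zipped characters plus the absolute length difference (faster).

-- ===== PORT A =====
-- A recurses on the two strings: empty cases return the other length, else head compare + recurse on tails.
def calcA : List Char → List Char → Int
  | [], s => (s.length : Int)
  | a :: f, [] => ((a :: f).length : Int)
  | a :: f, b :: s => (if a = b then 0 else 1) + calcA f s

def calculate_string_distance (first_string : String) (second_string : String) : Int :=
  calcA first_string.toList second_string.toList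

-- ===== PORT B =====
-- B: count mismatches over zip, add |len difference|.
def calculate_string_distance_alt (first_string : String) (second_string : String) : Int :=
  (((first_string.toList.zip second_string.toList).countP (fun p => p.1 ≠ p.2) : Int))
    + |(first_string.toList.length : Int) - (second_string.toList.length : Int)|

-- ===== PRECONDITION & SPEC =====
def Spec_calculate_string_distance (first_string : String) (second_string : String) (out : Int) : Prop := out = calculate_string_distance_alt first_string second_string
instance (first_string : String) (second_string : String) (out : Int) : Decidable (Spec_calculate_string_distance first_string second_string out) := by unfold Spec_calculate_string_distance; infer_instance

-- ===== CLAIM (what is proved, stated in full; the proofs are below) =====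
def Claim_equal_calculate_string_distance : Prop := ∀ (first_string : String) (second_string : String), Dom_calculate_string_distance first_string second_string → Spec_calculate_string_distance first_string second_string (calculate_string_distance first_string second_string)

-- ===== LEMMAS AND PROOFS =====
theorem calcA_eq (f s : List Char) :
    calcA f s = ((f.zip s).countP (fun p => p.1 ≠ p.2) : Int)
      + |(f.length : Int) - (s.length : Int)| := by
  induction f generalizing s with
  | nil => simp [calcA]
  | cons a f ih =>
    cases s with
    | nil =>
      simp [calcA]
      rw [abs_of_nonneg (by positivity)]
    | cons b s =>
      simp only [calcA, ih, List.zip_cons_cons, List.countP_cons, List.length_cons]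
      by_cases h : a = b <;> simp [h] <;> push_cast <;> ring_nf

-- ===== VERDICT (by name: the statement is the Claim_ definition above) =====
theorem calculate_string_distance_spec : Claim_equal_calculate_string_distance := by
  intro f s _
  unfold Spec_calculate_string_distance calculate_string_distance calculate_string_distance_alt
  exact calcA_eq _ _
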